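-- pv_equiv track=rewrite | github.com/shbunder/marcel-zoo | channels/telegram/formatting.py | _convert_blockquotes
-- ===== SOURCE A (Python) =====
-- def _convert_blockquotes(text: str) -> str:
--     """Convert ``> ...`` lines into ``<blockquote>...</blockquote>``."""
--     lines = text.split('\n')
--     result: list[str] = []
--     quote_lines: list[str] = []
--
--     def _flush_quote() -> None:
--         if quote_lines:
--             content = '\n'.join(quote_lines)
--             result.append(f'<blockquote>{content}</blockquote>')
--             quote_lines.clear()
--
--     for line in lines:
--         if line.startswith('&gt; '):
--             # > was escaped to &gt; in step 3
--             quote_lines.append(line[5:])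
--         elif line.startswith('&gt;'):
--             quote_lines.append(line[4:])
--         else:
--             _flush_quote()
--             result.append(line)
--
--     _flush_quote()
--     return '\n'.join(result)
-- ===== SOURCE B (Python) =====
-- def _convert_blockquotes(text: str) -> str:
--     """Convert ``> ...`` lines into ``<blockquote>...</blockquote>``."""
--     lines = text.split('\n')
--     out: list[str] = []
--     i = 0
--     n = len(lines)
--     while i < n:
--         if lines[i].startswith('&gt;'):
--             j = i
--             while j < n and lines[j].startswith('&gt;'):
--                 j += 1
--             stripped = [l[5:] if l.startswith('&gt; ') else l[4:] for l in lines[i:j]]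
--             out.append('<blockquote>' + '\n'.join(stripped) + '</blockquote>')
--             i = j
--         else:
--             out.append(lines[i])
--             i += 1
--     return '\n'.join(out)
-- ===== Notes on version B (the rewrite author's own statement) =====
-- stated objective: alternative
-- what changed: Replaced A's accumulate/flush state machine (result + pending quote_lines mutated per line) by a run-scanning two-pointer pass that finds each maximal run of '&gt;' lines and emits its blockquote in one step.
import Mathlib
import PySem

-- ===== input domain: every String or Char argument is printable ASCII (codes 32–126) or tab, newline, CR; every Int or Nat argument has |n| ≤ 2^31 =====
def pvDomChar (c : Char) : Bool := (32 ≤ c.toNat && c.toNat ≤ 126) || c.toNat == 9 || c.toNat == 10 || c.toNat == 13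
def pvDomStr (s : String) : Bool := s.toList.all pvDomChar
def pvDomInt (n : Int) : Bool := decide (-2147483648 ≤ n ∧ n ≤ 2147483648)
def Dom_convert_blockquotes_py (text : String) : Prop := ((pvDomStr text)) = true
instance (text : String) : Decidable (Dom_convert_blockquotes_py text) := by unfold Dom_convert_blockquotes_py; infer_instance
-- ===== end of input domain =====

-- B replaces A's accumulate/flush state machine by a run-scanning pass that wraps each
-- maximal run of '&gt;' lines in one blockquote (objective: alternative decomposition).

-- ===== PORT A =====
-- _flush_quote: append the wrapped joined quote_lines to result, if any
def pvFlushA (result quote_lines : List (List Char)) : List (List Char) :=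
  if quote_lines = [] then result
  else result ++ ["<blockquote>".toList ++ PySem.Chars.join ['\n'] quote_lines ++ "</blockquote>".toList]

-- the body of A's for-loop, state = (result, quote_lines)
def pvStepA (st : List (List Char) × List (List Char)) (line : List Char) :
    List (List Char) × List (List Char) :=
  if PySem.Chars.startswith line "&gt; ".toList then
    (st.1, st.2 ++ [PySem.List.slice line (some 5) none])
  else if PySem.Chars.startswith line "&gt;".toList then
    (st.1, st.2 ++ [PySem.List.slice line (some 4) none])
  else
    (pvFlushA st.1 st.2 ++ [line], [])

def convert_blockquotes_py (text : String) : String :=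
  let lines := PySem.Chars.splitOn text.toList ['\n']
  let st := lines.foldl pvStepA ([], [])
  String.ofList (PySem.Chars.join ['\n'] (pvFlushA st.1 st.2))

-- ===== PORT B =====
def pvIsQuote (l : List Char) : Bool := PySem.Chars.startswith l "&gt;".toList

def pvStrip (l : List Char) : List Char :=
  if PySem.Chars.startswith l "&gt; ".toList then PySem.List.slice l (some 5) none
  else PySem.List.slice l (some 4) none

-- B's outer loop: grab the maximal run of quote lines, wrap it, continue on the rest
def pvGoB : List (List Char) → List (List Char)
  | [] => []
  | l :: ls =>
    if pvIsQuote l then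
      ("<blockquote>".toList
        ++ PySem.Chars.join ['\n'] ((l :: ls.takeWhile pvIsQuote).map pvStrip)
        ++ "</blockquote>".toList)
      :: pvGoB (ls.dropWhile pvIsQuote)
    else l :: pvGoB ls
  termination_by ls => ls.length
  decreasing_by
    · simpa using Nat.lt_succ_of_le (ls.length_dropWhile_le pvIsQuote)
    · simp

def convert_blockquotes_py_alt (text : String) : String :=
  String.ofList (PySem.Chars.join ['\n'] (pvGoB (PySem.Chars.splitOn text.toList ['\n'])))

-- ===== PRECONDITION & SPEC =====
def Spec_convert_blockquotes_py (text : String) (out : String) : Prop := out = convert_blockquotes_py_alt text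
instance (text : String) (out : String) : Decidable (Spec_convert_blockquotes_py text out) := by unfold Spec_convert_blockquotes_py; infer_instance

-- ===== CLAIM (what is proved, stated in full; the proofs are below) =====
def Claim_equal_convert_blockquotes_py : Prop := ∀ (text : String), Dom_convert_blockquotes_py text → Spec_convert_blockquotes_py text (convert_blockquotes_py text)

-- ===== LEMMAS AND PROOFS =====

-- a '&gt; '-prefixed line is in particular '&gt;'-prefixed
lemma pvGt_of_gtSp (l : List Char) (h : PySem.Chars.startswith l "&gt; ".toList = true) :
    PySem.Chars.startswith l "&gt;".toList = true := by
  rw [PySem.Chars.startswith_iff] at h ⊢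
  exact List.IsPrefix.trans (by decide) h

-- the head of a dropWhile remainder fails the predicate
lemma pvDropWhile_head_false {α : Type} (p : α → Bool) (ls : List α) (r : α) (rs : List α)
    (h : ls.dropWhile p = r :: rs) : p r = false := by
  induction ls with
  | nil => simp at h
  | cons x xs ih =>
    by_cases hx : p x
    · rw [List.dropWhile_cons_of_pos hx] at h; exact ih h
    · rw [List.dropWhile_cons_of_neg hx] at h
      cases h; simpa using hx

-- how A's loop body treats a quote line / a plain line
lemma pvStepA_quote (l : List Char) (h : pvIsQuote l = true) (r q : List (List Char)) :
    pvStepA (r, q) l = (r, q ++ [pvStrip l]) := by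
  unfold pvIsQuote at h
  unfold pvStepA pvStrip
  by_cases h5 : PySem.Chars.startswith l "&gt; ".toList = true
  · rw [if_pos h5, if_pos h5]
  · rw [if_neg h5, if_neg h5, if_pos h]

lemma pvStepA_plain (l : List Char) (h : pvIsQuote l = false) (r q : List (List Char)) :
    pvStepA (r, q) l = (pvFlushA r q ++ [l], []) := by
  unfold pvIsQuote at h
  have h5 : ¬ PySem.Chars.startswith l "&gt; ".toList = true := by
    intro hc; rw [pvGt_of_gtSp l hc] at h; cases h
  unfold pvStepA
  rw [if_neg h5, if_neg (by simpa using h)]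

-- A's flush distributes the already-emitted result to the front
lemma pvFlushA_append (r r' q : List (List Char)) :
    pvFlushA (r ++ r') q = r ++ pvFlushA r' q := by
  unfold pvFlushA; split_ifs <;> simp

-- A's fold only ever appends to the result component
lemma pvFoldA_append (ls : List (List Char)) (r q : List (List Char)) :
    ls.foldl pvStepA (r, q) =
      (r ++ (ls.foldl pvStepA ([], q)).1, (ls.foldl pvStepA ([], q)).2) := by
  induction ls generalizing r q with
  | nil => simp
  | cons l ls ih =>
    simp only [List.foldl_cons]
    by_cases hq : pvIsQuote l = true
    · rw [pvStepA_quote l hq, pvStepA_quote l hq]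
      exact ih r (q ++ [pvStrip l])
    · have hq' : pvIsQuote l = false := by simpa using hq
      rw [pvStepA_plain l hq', pvStepA_plain l hq']
      rw [ih (pvFlushA r q ++ [l]) [], ih (pvFlushA [] q ++ [l]) []]
      rw [show pvFlushA r q = r ++ pvFlushA [] q from by simpa using pvFlushA_append r [] q]
      simp

-- A's fold over the leading run of quote lines just extends quote_lines by the stripped run
lemma pvFoldA_run (ls : List (List Char)) (q : List (List Char)) :
    ls.foldl pvStepA ([], q) =
      (ls.dropWhile pvIsQuote).foldl pvStepA ([], q ++ (ls.takeWhile pvIsQuote).map pvStrip) := by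
  induction ls generalizing q with
  | nil => simp
  | cons l ls ih =>
    by_cases h : pvIsQuote l
    · simp only [List.foldl_cons, pvStepA_quote l h, List.takeWhile_cons_of_pos h,
        List.dropWhile_cons_of_pos h, List.map_cons]
      rw [ih]; simp
    · simp [List.takeWhile_cons_of_neg h, List.dropWhile_cons_of_neg h]

-- main invariant: finishing A's fold from the empty state equals B's run scan
lemma pvMain : ∀ n (ls : List (List Char)), ls.length ≤ n →
    pvFlushA (ls.foldl pvStepA ([], [])).1 (ls.foldl pvStepA ([], [])).2 = pvGoB ls := by
  intro n
  induction n with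
  | zero =>
    intro ls h
    have : ls = [] := by simpa using h
    subst this; simp [pvFlushA, pvGoB]
  | succ n ih =>
    intro ls h
    match ls with
    | [] => simp [pvFlushA, pvGoB]
    | l :: ls =>
      by_cases hq : pvIsQuote l = true
      · rw [pvFoldA_run (l :: ls) []]
        simp only [List.takeWhile_cons_of_pos hq, List.dropWhile_cons_of_pos hq]
        rw [pvGoB]; rw [if_pos hq]
        set grp := (l :: ls.takeWhile pvIsQuote).map pvStrip with hgrp
        have hgrpne : grp ≠ [] := by simp [hgrp]
        match hrest : ls.dropWhile pvIsQuote with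
        | [] => simp only [List.nil_append, List.foldl_nil]; simp [pvFlushA, hgrpne, pvGoB]
        | r :: rs =>
          have hr : pvIsQuote r = false := pvDropWhile_head_false pvIsQuote ls r rs hrest
          simp only [List.nil_append, List.foldl_cons, pvStepA_plain r hr]
          rw [pvFoldA_append rs (pvFlushA [] grp ++ [r]) []]
          have hlen : rs.length ≤ n := by
            have h1 : (ls.dropWhile pvIsQuote).length ≤ ls.length := ls.length_dropWhile_le pvIsQuote
            rw [hrest] at h1; simp at h1 h; omega
          rw [pvFlushA_append, ih rs hlen]
          rw [pvGoB]; rw [if_neg (by simp [hr])]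
          simp [pvFlushA, hgrpne]
      · have hq' : pvIsQuote l = false := by simpa using hq
        simp only [List.foldl_cons, pvStepA_plain l hq']
        rw [show pvFlushA ([] : List (List Char)) [] = [] from by simp [pvFlushA]]
        simp only [List.nil_append]
        rw [pvFoldA_append ls [l] []]
        have hlen : ls.length ≤ n := by simp at h; omega
        rw [pvFlushA_append, ih ls hlen, pvGoB, if_neg (by simp [hq'])]
        simp

-- ===== VERDICT (by name: the statement is the Claim_ definition above) =====
theorem convert_blockquotes_py_spec : Claim_equal_convert_blockquotes_py := by
  intro text _
  unfold Spec_convert_blockquotes_py convert_blockquotes_py convert_blockquotes_py_alt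
  show String.ofList (PySem.Chars.join ['\n'] (pvFlushA
      ((PySem.Chars.splitOn text.toList ['\n']).foldl pvStepA ([], [])).1
      ((PySem.Chars.splitOn text.toList ['\n']).foldl pvStepA ([], [])).2)) = _
  rw [pvMain (PySem.Chars.splitOn text.toList ['\n']).length
    (PySem.Chars.splitOn text.toList ['\n']) le_rfl]
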